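-- pv_equiv track=rewrite | github.com/ag1le/LSTM_morse | generate.py | len_dits
-- ===== SOURCE A (Python) =====
-- def len_dits(cws):
--     """Return the length of CW string in dit units, including spaces. """
--     val = 0
--     for ch in cws:
--         if ch == '.': # dit len
--             val += 1
--         if ch == '-': # dah len
--             val += 3
--         if ch=='_':   #  word space
--             val += 4
--         val += 1 # el space
--     val += 2     # char space = 3  (el space +2)
--     return val
-- ===== SOURCE B (Python) =====
-- def len_dits(cws):
--     """Return the length of CW string in dit units, including spaces. """
--     # Closed form over aggregate character counts: each char contributes 1 (el space)
--     # plus its weight; the trailing +2 makes the final char space.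
--     return len(cws) + cws.count('.') + 3 * cws.count('-') + 4 * cws.count('_') + 2
-- ===== Notes on version B (the rewrite author's own statement) =====
-- stated objective: simpler
-- what changed: Replaced the per-character Python loop with branch-and-accumulate by a single closed-form arithmetic expression over len() and three str.count() calls, which run at C speed.
import Mathlib
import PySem

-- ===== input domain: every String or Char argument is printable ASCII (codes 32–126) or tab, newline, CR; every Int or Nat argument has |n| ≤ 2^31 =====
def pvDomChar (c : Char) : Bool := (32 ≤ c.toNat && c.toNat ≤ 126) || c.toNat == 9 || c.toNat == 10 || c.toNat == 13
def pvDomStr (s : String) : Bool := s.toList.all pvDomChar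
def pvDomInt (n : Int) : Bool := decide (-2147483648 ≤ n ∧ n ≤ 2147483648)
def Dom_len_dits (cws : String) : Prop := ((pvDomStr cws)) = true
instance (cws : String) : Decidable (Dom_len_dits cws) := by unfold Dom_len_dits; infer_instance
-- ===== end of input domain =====

-- B replaces A's per-character accumulation loop by a closed-form expression over
-- len and three character counts (objective: simpler).

-- ===== PORT A =====
def len_dits (cws : String) : Int :=
  (cws.toList.foldl (fun val ch =>
      let val := if ch = '.' then val + 1 else val
      let val := if ch = '-' then val + 3 else val
      let val := if ch = '_' then val + 4 else val
      val + 1) 0) + 2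

-- ===== PORT B =====
def len_dits_alt (cws : String) : Int :=
  PySem.Str.len cws + (PySem.Str.count cws "." : Int)
    + 3 * (PySem.Str.count cws "-" : Int) + 4 * (PySem.Str.count cws "_" : Int) + 2

-- ===== PRECONDITION & SPEC =====
def Spec_len_dits (cws : String) (out : Int) : Prop := out = len_dits_alt cws
instance (cws : String) (out : Int) : Decidable (Spec_len_dits cws out) := by unfold Spec_len_dits; infer_instance

-- ===== CLAIM (what is proved, stated in full; the proofs are below) =====
def Claim_equal_len_dits : Prop := ∀ (cws : String), Dom_len_dits cws → Spec_len_dits cws (len_dits cws)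

-- ===== LEMMAS AND PROOFS =====

-- Python's str.count with a single-character needle is the character count.
theorem count_go_singleton (c : Char) (l : List Char) (fuel : Nat) (acc : Nat)
    (h : l.length ≤ fuel) :
    PySem.Chars.count.go [c] fuel l acc = acc + l.count c := by
  induction l generalizing fuel acc with
  | nil =>
      rw [PySem.Chars.count.go.eq_def]
      cases fuel <;> simp
  | cons hd t ih =>
      cases fuel with
      | zero => simp at h
      | succ fuel =>
          rw [PySem.Chars.count.go.eq_def]
          simp only [List.length_cons, Nat.succ_le_succ_iff] at h
          by_cases hc : hd = c
          · simp [hc, List.isPrefixOf, ih _ _ h]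
            omega
          · have hp : List.isPrefixOf [c] (hd :: t) = false := by
              simp [List.isPrefixOf]
              exact fun e => (hc e.symm).elim
            simp [hp, ih _ _ h, hc]

theorem count_singleton (c : Char) (cs : List Char) :
    PySem.Chars.count cs [c] = cs.count c := by
  simp [PySem.Chars.count, count_go_singleton c cs cs.length 0 le_rfl]

theorem foldl_len_dits (l : List Char) (v : Int) :
    l.foldl (fun val ch =>
      let val := if ch = '.' then val + 1 else val
      let val := if ch = '-' then val + 3 else val
      let val := if ch = '_' then val + 4 else val
      val + 1) v
    = v + l.length + (l.count '.' : Int) + 3 * (l.count '-' : Int) + 4 * (l.count '_' : Int) := by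
  induction l generalizing v with
  | nil => simp
  | cons h t ih =>
      simp only [List.foldl_cons, ih, List.length_cons, List.count_cons]
      by_cases h1 : h = '.' <;> by_cases h2 : h = '-' <;> by_cases h3 : h = '_' <;>
        simp_all <;> ring

-- ===== VERDICT (by name: the statement is the Claim_ definition above) =====
theorem len_dits_spec : Claim_equal_len_dits := by
  intro cws _
  unfold Spec_len_dits len_dits len_dits_alt
  rw [foldl_len_dits]
  simp only [PySem.Str.len_eq, PySem.Str.count_eq]
  have hd : (".":String).toList = ['.'] := rfl
  have hh : ("-":String).toList = ['-'] := rfl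
  have hu : ("_":String).toList = ['_'] := rfl
  rw [hd, hh, hu, count_singleton, count_singleton, count_singleton]
  ring
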